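-- pv_equiv track=rewrite | github.com/chuckyLeeVIII/SkillClaw | skillclaw/claw_adapter.py | _remove_toml_table
-- ===== SOURCE A (Python) =====
-- def _remove_toml_table(text: str, table_name: str) -> str:
--     """Remove a TOML table and its body, if present."""
--     lines = text.splitlines()
--     kept: list[str] = []
--     skipping = False
--     target_header = f"[{table_name}]"
--
--     for line in lines:
--         stripped = line.strip()
--         is_header = stripped.startswith("[") and stripped.endswith("]")
--         if is_header:
--             if skipping:
--                 skipping = False
--             if stripped == target_header:
--                 skipping = True
--                 continue
--         if skipping:
--             continue
--         kept.append(line)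
--
--     return "\n".join(kept).rstrip() + "\n"
-- ===== SOURCE B (Python) =====
-- def _remove_toml_table(text: str, table_name: str) -> str:
--     """Remove a TOML table and its body, if present."""
--     target = f"[{table_name}]"
--
--     def is_header(line: str) -> bool:
--         s = line.strip()
--         return s.startswith("[") and s.endswith("]")
--
--     # Partition the lines into a preamble chunk plus one chunk per header line.
--     chunks = []
--     cur = []
--     for line in text.splitlines():
--         if is_header(line):
--             chunks.append(cur)
--             cur = [line]
--         else:
--             cur.append(line)
--     chunks.append(cur)
--
--     # Keep every chunk whose header is not the target table.
--     kept = []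
--     for ch in chunks:
--         if ch and ch[0].strip() == target:
--             continue
--         kept.extend(ch)
--     return "\n".join(kept).rstrip() + "\n"
-- ===== Notes on version B (the rewrite author's own statement) =====
-- stated objective: alternative
-- what changed: Replaces A's single stateful pass with a skip flag by a partition of the lines into header-delimited chunks followed by a filter that drops every chunk whose header is the target table.
import Mathlib
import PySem

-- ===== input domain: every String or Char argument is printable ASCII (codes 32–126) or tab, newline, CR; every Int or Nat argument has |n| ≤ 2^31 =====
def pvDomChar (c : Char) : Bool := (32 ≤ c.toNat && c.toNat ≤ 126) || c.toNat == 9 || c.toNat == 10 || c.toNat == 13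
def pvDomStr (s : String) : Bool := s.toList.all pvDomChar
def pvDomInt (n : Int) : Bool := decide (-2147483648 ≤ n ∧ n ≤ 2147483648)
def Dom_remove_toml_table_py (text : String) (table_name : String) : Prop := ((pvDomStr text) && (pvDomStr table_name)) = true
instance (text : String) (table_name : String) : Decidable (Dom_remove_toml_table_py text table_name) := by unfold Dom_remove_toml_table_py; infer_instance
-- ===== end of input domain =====

-- B changes the decomposition: instead of A's single stateful skip-flag loop, B partitions the
-- lines into header-delimited chunks and drops the chunks whose header is the target (objective: alternative).

-- ===== PORT A =====
-- the body of A's for-loop over lines, state = (kept, skipping)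
def pvStepA (target : List Char) (st : List (List Char) × Bool) (line : List Char) :
    List (List Char) × Bool :=
  let stripped := PySem.Chars.strip line
  let is_header := PySem.Chars.startswith stripped ['['] && PySem.Chars.endswith stripped [']']
  if is_header then
    -- skipping is reset to false on any header; set to true (and continue) on the target header
    if stripped == target then (st.1, true)
    else (st.1 ++ [line], false)
  else if st.2 then (st.1, st.2)
  else (st.1 ++ [line], st.2)

def remove_toml_table_py (text : String) (table_name : String) : String :=
  let lines := PySem.Chars.splitlines text.toList
  let target : List Char := '[' :: table_name.toList ++ [']']
  let r := lines.foldl (pvStepA target) ([], false)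
  String.ofList (PySem.Chars.rstrip (PySem.Chars.join ['\n'] r.1) ++ ['\n'])

-- ===== PORT B =====
def pvIsHeader (line : List Char) : Bool :=
  let s := PySem.Chars.strip line
  PySem.Chars.startswith s ['['] && PySem.Chars.endswith s [']']

-- chunk-building loop of B, state = (chunks, cur)
def pvStepB (st : List (List (List Char)) × List (List Char)) (line : List Char) :
    List (List (List Char)) × List (List Char) :=
  if pvIsHeader line then (st.1 ++ [st.2], [line]) else (st.1, st.2 ++ [line])

-- 'ch and ch[0].strip() == target' : the chunk is a target-table chunk and is dropped
def pvDropChunk (target : List Char) (ch : List (List Char)) : Bool :=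
  match ch with
  | [] => false
  | h :: _ => PySem.Chars.strip h == target

def remove_toml_table_py_alt (text : String) (table_name : String) : String :=
  let target : List Char := '[' :: table_name.toList ++ [']']
  let st := (PySem.Chars.splitlines text.toList).foldl pvStepB ([], [])
  let chunks := st.1 ++ [st.2]
  let kept := chunks.foldl (fun acc ch => if pvDropChunk target ch then acc else acc ++ ch) []
  String.ofList (PySem.Chars.rstrip (PySem.Chars.join ['\n'] kept) ++ ['\n'])

-- ===== PRECONDITION & SPEC =====
def Spec_remove_toml_table_py (text : String) (table_name : String) (out : String) : Prop := out = remove_toml_table_py_alt text table_name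
instance (text : String) (table_name : String) (out : String) : Decidable (Spec_remove_toml_table_py text table_name out) := by unfold Spec_remove_toml_table_py; infer_instance

-- ===== CLAIM (what is proved, stated in full; the proofs are below) =====
def Claim_equal_remove_toml_table_py : Prop := ∀ (text : String) (table_name : String), Dom_remove_toml_table_py text table_name → Spec_remove_toml_table_py text table_name (remove_toml_table_py text table_name)

-- ===== LEMMAS AND PROOFS =====

-- the lines a chunk contributes to B's output
def pvKeep (target : List Char) (ch : List (List Char)) : List (List Char) :=
  if pvDropChunk target ch then [] else ch

lemma pvKeep_flat (target : List Char) (chunks : List (List (List Char)))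
    (acc : List (List Char)) :
    chunks.foldl (fun acc ch => if pvDropChunk target ch then acc else acc ++ ch) acc
      = acc ++ chunks.flatMap (pvKeep target) := by
  induction chunks generalizing acc with
  | nil => simp
  | cons c t ih => by_cases h : pvDropChunk target c <;> simp [ih, pvKeep, h]

lemma pvHeader_of_strip_eq (name l : List Char)
    (h : PySem.Chars.strip l = '[' :: name ++ [']']) : pvIsHeader l = true := by
  simp only [pvIsHeader, h, Bool.and_eq_true, PySem.Chars.startswith_iff,
    PySem.Chars.endswith_iff]
  exact ⟨⟨name ++ [']'], rfl⟩, ⟨'[' :: name, by simp⟩⟩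

lemma pvLoop_eq (target : List Char)
    (htg : ∀ l, PySem.Chars.strip l = target → pvIsHeader l = true)
    (ls : List (List Char)) :
    ∀ (chunks : List (List (List Char))) (cur : List (List Char)),
    ls.foldl (pvStepA target)
        (chunks.flatMap (pvKeep target) ++ pvKeep target cur, pvDropChunk target cur)
      = (((ls.foldl pvStepB (chunks, cur)).1 ++ [(ls.foldl pvStepB (chunks, cur)).2]).flatMap (pvKeep target),
         pvDropChunk target ((ls.foldl pvStepB (chunks, cur)).2)) := by
  induction ls with
  | nil =>
    intro chunks cur
    simp [pvKeep]
  | cons l t ih =>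
    intro chunks cur
    simp only [List.foldl_cons]
    by_cases hh : pvIsHeader l
    · have hB : pvStepB (chunks, cur) l = (chunks ++ [cur], [l]) := by
        simp [pvStepB, hh]
      have hh' := hh
      simp only [pvIsHeader] at hh'
      by_cases he : PySem.Chars.strip l = target
      · -- target header: A starts skipping, B opens a chunk that will be dropped
        have hbe : (PySem.Chars.strip l == target) = true := by simp [he]
        have hA : pvStepA target
            (chunks.flatMap (pvKeep target) ++ pvKeep target cur, pvDropChunk target cur) l
            = (chunks.flatMap (pvKeep target) ++ pvKeep target cur, true) := by
          simp only [pvStepA, hh', hbe, if_true]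
        rw [hA, hB]
        have := ih (chunks ++ [cur]) [l]
        simpa [pvKeep, pvDropChunk, hbe, List.flatMap_append] using this
      · -- other header: A keeps the line and stops skipping, B opens a kept chunk
        have hbe : (PySem.Chars.strip l == target) = false := by simp [he]
        have hA : pvStepA target
            (chunks.flatMap (pvKeep target) ++ pvKeep target cur, pvDropChunk target cur) l
            = (chunks.flatMap (pvKeep target) ++ pvKeep target cur ++ [l], false) := by
          simp only [pvStepA, hh', hbe, if_true, Bool.false_eq_true, if_false]
        rw [hA, hB]
        have := ih (chunks ++ [cur]) [l]
        simpa [pvKeep, pvDropChunk, hbe, List.flatMap_append, List.append_assoc] using this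
    · have hB : pvStepB (chunks, cur) l = (chunks, cur ++ [l]) := by
        simp [pvStepB, hh]
      have hAcond : (PySem.Chars.startswith (PySem.Chars.strip l) ['['] &&
          PySem.Chars.endswith (PySem.Chars.strip l) [']']) = false := by
        simp only [pvIsHeader] at hh
        simpa using hh
      match cur with
      | [] =>
        -- preamble line: it is not a header, so it cannot open a target chunk
        have hne : PySem.Chars.strip l ≠ target := fun h => hh (htg l h)
        have hbe : (PySem.Chars.strip l == target) = false := by simp [hne]
        have hA : pvStepA target (chunks.flatMap (pvKeep target) ++ pvKeep target [], pvDropChunk target []) l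
            = (chunks.flatMap (pvKeep target) ++ [l], false) := by
          simp [pvStepA, hAcond, pvDropChunk, pvKeep]
        rw [hA, hB]
        have := ih chunks [l]
        simpa [pvKeep, pvDropChunk, hbe] using this
      | c :: tl =>
        by_cases hd : PySem.Chars.strip c = target
        · have hbe : (PySem.Chars.strip c == target) = true := by simp [hd]
          have hA : pvStepA target
              (chunks.flatMap (pvKeep target) ++ pvKeep target (c :: tl), pvDropChunk target (c :: tl)) l
              = (chunks.flatMap (pvKeep target) ++ pvKeep target (c :: tl), pvDropChunk target (c :: tl)) := by
            simp [pvStepA, hAcond, pvDropChunk, hbe]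
          rw [hA, hB]
          have := ih chunks (c :: (tl ++ [l]))
          simpa [pvKeep, pvDropChunk, hbe] using this
        · have hbe : (PySem.Chars.strip c == target) = false := by simp [hd]
          have hA : pvStepA target
              (chunks.flatMap (pvKeep target) ++ pvKeep target (c :: tl), pvDropChunk target (c :: tl)) l
              = (chunks.flatMap (pvKeep target) ++ pvKeep target (c :: tl) ++ [l], pvDropChunk target (c :: tl)) := by
            simp [pvStepA, hAcond, pvDropChunk, hbe, pvKeep, List.append_assoc]
          rw [hA, hB]
          have := ih chunks (c :: (tl ++ [l]))
          simpa [pvKeep, pvDropChunk, hbe, List.append_assoc] using this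

-- ===== VERDICT (by name: the statement is the Claim_ definition above) =====
theorem remove_toml_table_py_spec : Claim_equal_remove_toml_table_py := by
  intro text table_name _
  unfold Spec_remove_toml_table_py remove_toml_table_py remove_toml_table_py_alt
  have h := pvLoop_eq ('[' :: table_name.toList ++ [']'])
      (fun l hl => pvHeader_of_strip_eq table_name.toList l hl)
      (PySem.Chars.splitlines text.toList) [] []
  simp only [pvKeep, pvDropChunk, List.flatMap_nil, List.append_nil,
    Bool.false_eq_true, if_false] at h
  simp only [h, pvKeep_flat, List.nil_append]
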